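-- pv_equiv track=rewrite | github.com/Matt-Aurora-Ventures/Jarvis | bots/shared/personality.py | _extract_personality_traits_from_soul
-- ===== SOURCE A (Python) =====
-- from typing import Dict, List, Optional, Any
--
-- def _extract_personality_traits_from_soul(soul_content: str) -> Dict[str, Any]:
--     """
--     Extract structured personality traits from SOUL.md content.
--
--     Parses the markdown to extract values, traits, style information.
--     """
--     traits = {
--         "values": [],
--         "traits": [],
--         "boundaries": [],
--     }
--
--     if not soul_content:
--         return traits
--
--     current_section = None
--     lines = soul_content.split("\n")
--
--     for line in lines:
--         line = line.strip()
--
--         # Detect section headers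
--         if line.startswith("## "):
--             section = line[3:].lower()
--             if "value" in section:
--                 current_section = "values"
--             elif "trait" in section or "personality" in section:
--                 current_section = "traits"
--             elif "boundar" in section or "restrict" in section:
--                 current_section = "boundaries"
--             elif "style" in section or "communication" in section:
--                 current_section = "style"
--             else:
--                 current_section = None
--
--         # Extract bullet points
--         elif line.startswith("- ") and current_section:
--             item = line[2:].strip()
--             # Clean up bold markers
--             item = item.replace("**", "").strip()
--             if ":" in item:
--                 item = item.split(":")[0].strip()
--             if item and current_section in traits:
--                 traits[current_section].append(item)
--
--     return traits
-- ===== SOURCE B (Python) =====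
-- def _classify(section):
--     if "value" in section:
--         return "values"
--     if "trait" in section or "personality" in section:
--         return "traits"
--     if "boundar" in section or "restrict" in section:
--         return "boundaries"
--     return None
--
--
-- def _clean(line):
--     if not line.startswith("- "):
--         return ""
--     item = line[2:].strip().replace("**", "").strip()
--     if ":" in item:
--         item = item.split(":")[0].strip()
--     return item
--
--
-- def _extract_personality_traits_from_soul(soul_content):
--     # Phase 1: one pass grouping the stripped lines under their section key.
--     groups = []
--     key, bullets = None, []
--     for raw in soul_content.split("\n"):
--         line = raw.strip()
--         if line.startswith("## "):
--             groups.append((key, bullets))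
--             key, bullets = _classify(line[3:].lower()), []
--         else:
--             bullets.append(line)
--     groups.append((key, bullets))
--     # Phase 2: collect the cleaned, non-empty bullets per known section key.
--     return {
--         k: [item for gk, gb in groups if gk == k
--             for item in map(_clean, gb) if item]
--         for k in ("values", "traits", "boundaries")
--     }
-- ===== Notes on version B (the rewrite author's own statement) =====
-- stated objective: alternative
-- what changed: Replaces A's single stateful loop (current-section variable mutated while appending into the dict) by a two-phase pipeline: one pass groups stripped lines into (section-key, bullet-lines) groups, then a per-key comprehension collects the cleaned non-empty bullets for each of the three known keys.
import Mathlib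
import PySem

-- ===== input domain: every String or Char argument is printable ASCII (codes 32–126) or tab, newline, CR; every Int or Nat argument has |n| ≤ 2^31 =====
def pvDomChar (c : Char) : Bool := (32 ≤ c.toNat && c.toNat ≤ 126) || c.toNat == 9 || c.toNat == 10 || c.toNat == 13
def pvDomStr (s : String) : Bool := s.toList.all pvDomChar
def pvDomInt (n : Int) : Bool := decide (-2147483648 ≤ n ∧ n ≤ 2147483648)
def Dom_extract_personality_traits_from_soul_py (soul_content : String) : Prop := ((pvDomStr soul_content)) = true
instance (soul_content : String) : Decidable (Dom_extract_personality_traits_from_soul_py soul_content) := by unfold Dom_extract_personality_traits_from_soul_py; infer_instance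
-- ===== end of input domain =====

-- B replaces A's single stateful loop by a two-phase pipeline (group lines by section, then collect cleaned bullets per key); alternative decomposition, same cost.

-- ===== PORT A =====
-- A's header classification (the 5-way if/elif chain), verbatim
def pvClassifyA (sec_ : String) : Option String :=
  if PySem.Str.isIn "value" sec_ then some "values"
  else if PySem.Str.isIn "trait" sec_ || PySem.Str.isIn "personality" sec_ then some "traits"
  else if PySem.Str.isIn "boundar" sec_ || PySem.Str.isIn "restrict" sec_ then some "boundaries"
  else if PySem.Str.isIn "style" sec_ || PySem.Str.isIn "communication" sec_ then some "style"
  else none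

-- one iteration of A's loop body; state = (current_section, traits dict)
def pvStepA (st : Option String × PySem.Dict String (List String)) (rawline : String) :
    Option String × PySem.Dict String (List String) :=
  let line := PySem.Str.strip rawline
  if PySem.Str.startswith line "## " then
    (pvClassifyA (PySem.Str.lower (PySem.Str.slice line (some 3) none)), st.2)
  else
    match st.1 with
    | some cs =>
      if PySem.Str.startswith line "- " then
        let item := PySem.Str.strip (PySem.Str.slice line (some 2) none)
        let item := PySem.Str.strip (PySem.Str.replace item "**" "")
        let item := if PySem.Str.isIn ":" item then
            PySem.Str.strip (((PySem.Str.split? item ":").getD []).headD "") else item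
        if item != "" && st.2.contains cs then (some cs, st.2.modify cs [] (fun l => l ++ [item])) else st
      else st
    | none => st

def extract_personality_traits_from_soul_py (soul_content : String) : List (String × List String) :=
  let traits : PySem.Dict String (List String) :=
    ((PySem.Dict.empty.insert "values" []).insert "traits" []).insert "boundaries" []
  if soul_content == "" then traits.items
  else
    (((PySem.Str.split? soul_content "\n").getD []).foldl pvStepA (none, traits)).2.items

-- ===== PORT B =====
def pvClassify (sect : String) : Option String :=
  if PySem.Str.isIn "value" sect then some "values"
  else if PySem.Str.isIn "trait" sect || PySem.Str.isIn "personality" sect then some "traits"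
  else if PySem.Str.isIn "boundar" sect || PySem.Str.isIn "restrict" sect then some "boundaries"
  else none

def pvClean (line : String) : String :=
  if PySem.Str.startswith line "- " then
    let item := PySem.Str.strip (PySem.Str.slice line (some 2) none)
    let item := PySem.Str.strip (PySem.Str.replace item "**" "")
    if PySem.Str.isIn ":" item then
      PySem.Str.strip (((PySem.Str.split? item ":").getD []).headD "")
    else item
  else ""

-- phase 1: group the stripped lines under their section key
def pvGroups : List String → Option String × List String → List (Option String × List String)
  | [], cur => [cur]
  | raw :: rest, cur =>
    let line := PySem.Str.strip raw
    if PySem.Str.startswith line "## " then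
      cur :: pvGroups rest (pvClassify (PySem.Str.lower (PySem.Str.slice line (some 3) none)), [])
    else
      pvGroups rest (cur.1, cur.2 ++ [line])

-- phase 2: cleaned non-empty bullets of all groups carrying this key, in order
def pvCollect (groups : List (Option String × List String)) (key : String) : List String :=
  (groups.filter (fun g => g.1 == some key)).flatMap
    (fun g => (g.2.map pvClean).filter (fun s => s != ""))

def extract_personality_traits_from_soul_py_alt (soul_content : String) : List (String × List String) :=
  let groups := pvGroups ((PySem.Str.split? soul_content "\n").getD []) (none, [])
  [("values", pvCollect groups "values"),
   ("traits", pvCollect groups "traits"),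
   ("boundaries", pvCollect groups "boundaries")]

-- ===== PRECONDITION & SPEC =====
def Spec_extract_personality_traits_from_soul_py (soul_content : String) (out : List (String × List String)) : Prop := out = extract_personality_traits_from_soul_py_alt soul_content
instance (soul_content : String) (out : List (String × List String)) : Decidable (Spec_extract_personality_traits_from_soul_py soul_content out) := by unfold Spec_extract_personality_traits_from_soul_py; infer_instance

-- ===== CLAIM (what is proved, stated in full; the proofs are below) =====
def Claim_equal_extract_personality_traits_from_soul_py : Prop := ∀ (soul_content : String), Dom_extract_personality_traits_from_soul_py soul_content → Spec_extract_personality_traits_from_soul_py soul_content (extract_personality_traits_from_soul_py soul_content)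

-- ===== LEMMAS AND PROOFS =====
-- the dict A maintains, as a literal three-entry association list
def pvDictOf (v t b : List String) : PySem.Dict String (List String) :=
  PySem.Dict.mk [("values", v), ("traits", t), ("boundaries", b)]

-- B's key for A's current_section: the three known keys survive, "style"/None are dropped
def pvPhi (sec : Option String) : Option String :=
  if sec == some "values" || sec == some "traits" || sec == some "boundaries" then sec else none

def pvClf (bs : List String) : List String := (bs.map pvClean).filter (fun s => s != "")

theorem pvCollect_cons (g : Option String × List String) (G : List (Option String × List String)) (key : String) :
    pvCollect (g :: G) key = (if g.1 == some key then pvClf g.2 else []) ++ pvCollect G key := by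
  by_cases h : g.1 == some key <;> simp [pvCollect, pvClf, h]

theorem pvClf_append (a b : List String) : pvClf (a ++ b) = pvClf a ++ pvClf b := by
  simp [pvClf]

theorem pvGroups_cons_header (raw : String) (rest : List String) (cur : Option String × List String)
    (h : PySem.Str.startswith (PySem.Str.strip raw) "## " = true) :
    pvGroups (raw :: rest) cur
      = cur :: pvGroups rest (pvClassify (PySem.Str.lower (PySem.Str.slice (PySem.Str.strip raw) (some 3) none)), []) := by
  simp only [pvGroups, h, if_true]

theorem pvGroups_cons_not_header (raw : String) (rest : List String) (cur : Option String × List String)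
    (h : PySem.Str.startswith (PySem.Str.strip raw) "## " = false) :
    pvGroups (raw :: rest) cur = pvGroups rest (cur.1, cur.2 ++ [PySem.Str.strip raw]) := by
  simp only [pvGroups, h, Bool.false_eq_true, if_false]

theorem pvCollect_buf (lines : List String) : ∀ (k : Option String) (buf : List String) (key : String),
    pvCollect (pvGroups lines (k, buf)) key
      = (if k == some key then pvClf buf else []) ++ pvCollect (pvGroups lines (k, [])) key := by
  induction lines with
  | nil =>
    intro k buf key
    by_cases hk : k == some key <;> simp [pvGroups, pvCollect, pvClf, hk]
  | cons raw rest ih =>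
    intro k buf key
    by_cases h : PySem.Str.startswith (PySem.Str.strip raw) "## "
    · rw [pvGroups_cons_header raw rest _ h, pvGroups_cons_header raw rest _ h,
        pvCollect_cons, pvCollect_cons]
      simp [pvClf]
    · have hf := eq_false_of_ne_true h
      rw [pvGroups_cons_not_header raw rest _ hf, pvGroups_cons_not_header raw rest _ hf]
      rw [ih k (buf ++ [PySem.Str.strip raw]) key, ih k ([] ++ [PySem.Str.strip raw]) key,
        pvClf_append, pvClf_append]
      by_cases hk : k == some key <;> simp [hk, pvClf]

theorem pvPhi_classifyA (s : String) : pvPhi (pvClassifyA s) = pvClassify s := by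
  unfold pvClassifyA pvClassify pvPhi
  split_ifs <;> simp_all

theorem pvContains_dictOf (v t b : List String) (cs : String) :
    (pvDictOf v t b).contains cs = ("values" == cs || "traits" == cs || "boundaries" == cs) := by
  simp [pvDictOf, PySem.Dict.contains, Bool.or_assoc]

theorem pvModify_values (v t b : List String) (item : String) :
    (pvDictOf v t b).modify "values" [] (fun l => l ++ [item]) = pvDictOf (v ++ [item]) t b := by
  simp [pvDictOf, PySem.Dict.modify, PySem.Dict.insert, PySem.Dict.contains, PySem.Dict.getD,
    PySem.Dict.get?]

theorem pvModify_traits (v t b : List String) (item : String) :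
    (pvDictOf v t b).modify "traits" [] (fun l => l ++ [item]) = pvDictOf v (t ++ [item]) b := by
  simp [pvDictOf, PySem.Dict.modify, PySem.Dict.insert, PySem.Dict.contains, PySem.Dict.getD,
    PySem.Dict.get?]

theorem pvModify_boundaries (v t b : List String) (item : String) :
    (pvDictOf v t b).modify "boundaries" [] (fun l => l ++ [item]) = pvDictOf v t (b ++ [item]) := by
  simp [pvDictOf, PySem.Dict.modify, PySem.Dict.insert, PySem.Dict.contains, PySem.Dict.getD,
    PySem.Dict.get?]

-- A's loop body, characterised through B's pvClean / A's pvClassifyA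
theorem pvStepA_char (sec : Option String) (d : PySem.Dict String (List String)) (raw : String) :
    pvStepA (sec, d) raw =
      if PySem.Str.startswith (PySem.Str.strip raw) "## " then
        (pvClassifyA (PySem.Str.lower (PySem.Str.slice (PySem.Str.strip raw) (some 3) none)), d)
      else
        match sec with
        | some cs =>
          if pvClean (PySem.Str.strip raw) != "" && d.contains cs then
            (some cs, d.modify cs [] (fun l => l ++ [pvClean (PySem.Str.strip raw)]))
          else (sec, d)
        | none => (sec, d) := by
  by_cases h : PySem.Str.startswith (PySem.Str.strip raw) "## "
  · have h' : PySem.Chars.startswith (PySem.Chars.strip raw.toList) ['#', '#', ' '] = true := by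
      simpa using h
    simp [pvStepA, h']
  · have h' : PySem.Chars.startswith (PySem.Chars.strip raw.toList) ['#', '#', ' '] = false := by
      simpa using eq_false_of_ne_true h
    cases sec with
    | none => simp [pvStepA, h']
    | some cs =>
      by_cases h2 : PySem.Str.startswith (PySem.Str.strip raw) "- "
      · have h2' : PySem.Chars.startswith (PySem.Chars.strip raw.toList) ['-', ' '] = true := by
          simpa using h2
        simp [pvStepA, pvClean, h', h2']
      · have h2' : PySem.Chars.startswith (PySem.Chars.strip raw.toList) ['-', ' '] = false := by
          simpa using eq_false_of_ne_true h2
        simp [pvStepA, pvClean, h', h2']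

theorem pvCollect_buf_single (rest : List String) (k : Option String) (l : String) (key : String) :
    pvCollect (pvGroups rest (k, [l])) key
      = (if k == some key then pvClf [l] else []) ++ pvCollect (pvGroups rest (k, [])) key :=
  pvCollect_buf rest k [l] key

theorem pvMain (lines : List String) : ∀ (sec : Option String) (v t b : List String),
    (lines.foldl pvStepA (sec, pvDictOf v t b)).2.items
      = [("values", v ++ pvCollect (pvGroups lines (pvPhi sec, [])) "values"),
         ("traits", t ++ pvCollect (pvGroups lines (pvPhi sec, [])) "traits"),
         ("boundaries", b ++ pvCollect (pvGroups lines (pvPhi sec, [])) "boundaries")] := by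
  induction lines with
  | nil => intro sec v t b; simp [pvGroups, pvCollect, pvDictOf]
  | cons raw rest ih =>
    intro sec v t b
    by_cases h : PySem.Str.startswith (PySem.Str.strip raw) "## "
    · -- header line: section changes, dict unchanged, a new group opens
      simp only [List.foldl_cons, pvStepA_char, h, if_true]
      rw [ih, pvPhi_classifyA, pvGroups_cons_header raw rest _ h]
      simp [pvCollect_cons, pvClf]
    · have hf := eq_false_of_ne_true h
      rw [pvGroups_cons_not_header raw rest _ hf]
      cases sec with
      | none =>
        simp only [List.foldl_cons, pvStepA_char, hf, Bool.false_eq_true, if_false]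
        rw [ih]
        simp [pvCollect_buf_single, pvPhi]
      | some cs =>
        simp only [List.foldl_cons, pvStepA_char, hf, Bool.false_eq_true, if_false]
        by_cases hv : cs = "values"
        · subst hv
          by_cases hi : pvClean (PySem.Str.strip raw) = ""
          · rw [if_neg (by simp [hi]), ih]
            simp [pvCollect_buf_single, pvClf, pvPhi, hi]
          · rw [if_pos (by simp [hi, pvContains_dictOf]), pvModify_values, ih]
            simp [pvCollect_buf_single, pvClf, pvPhi, hi, List.append_assoc]
        · by_cases ht : cs = "traits"
          · subst ht
            by_cases hi : pvClean (PySem.Str.strip raw) = ""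
            · rw [if_neg (by simp [hi]), ih]
              simp [pvCollect_buf_single, pvClf, pvPhi, hi]
            · rw [if_pos (by simp [hi, pvContains_dictOf]), pvModify_traits, ih]
              simp [pvCollect_buf_single, pvClf, pvPhi, hi, List.append_assoc]
          · by_cases hb : cs = "boundaries"
            · subst hb
              by_cases hi : pvClean (PySem.Str.strip raw) = ""
              · rw [if_neg (by simp [hi]), ih]
                simp [pvCollect_buf_single, pvClf, pvPhi, hi]
              · rw [if_pos (by simp [hi, pvContains_dictOf]), pvModify_boundaries, ih]
                simp [pvCollect_buf_single, pvClf, pvPhi, hi, List.append_assoc]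
            · -- an unknown section (e.g. "style"): A drops the bullet, B's key is none
              have hφ : pvPhi (some cs) = none := by
                simp [pvPhi, hv, ht, hb]
              rw [if_neg (by simp [pvContains_dictOf, hv, ht, hb, Ne.symm]), ih]
              simp [pvCollect_buf_single, hφ]

theorem pvFinal (s : String) : extract_personality_traits_from_soul_py s = extract_personality_traits_from_soul_py_alt s := by
  by_cases hs : s == ""
  · have hs' : s = "" := by simpa using hs
    subst hs'
    rfl
  · unfold extract_personality_traits_from_soul_py extract_personality_traits_from_soul_py_alt
    rw [if_neg (by simpa using hs)]
    have hinit : ((PySem.Dict.empty.insert "values" []).insert "traits" []).insert "boundaries" ([] : List String)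
        = pvDictOf [] [] [] := by rfl
    rw [hinit, pvMain]
    rfl

-- ===== VERDICT (by name: the statement is the Claim_ definition above) =====
theorem extract_personality_traits_from_soul_py_spec : Claim_equal_extract_personality_traits_from_soul_py := by
  intro s _
  exact pvFinal s
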